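-- pv_equiv track=rewrite | github.com/alexpfernandes/adventofcode2020 | advent-day-10.py | neighbormaker
-- ===== SOURCE A (Python) =====
-- def neighbormaker(chargelist):
--     neighborlist = []
--     for index, charge in enumerate(chargelist):
--         if index == len(chargelist)-1:
--             break
--         else:
--             rem_list = [item - 3 for item in chargelist[index+1:]]
--             neighborlist.append(sum(1 if x <= charge else 0 for x in rem_list))
--     return neighborlist
-- ===== SOURCE B (Python) =====
-- def neighbormaker(chargelist):
--     # Right-to-left sweep keeping the already-seen suffix in a sorted list;
--     # each count is a binary-search upper bound instead of a pairwise scan.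
--     def ub(a, v):
--         # index of the first element of sorted list a that is > v
--         lo, hi = 0, len(a)
--         while lo < hi:
--             mid = (lo + hi) // 2
--             if a[mid] <= v:
--                 lo = mid + 1
--             else:
--                 hi = mid
--         return lo
--     seen = []
--     out = []
--     for charge in reversed(chargelist):
--         out.append(ub(seen, charge + 3))
--         seen.insert(ub(seen, charge), charge)
--     out.reverse()
--     return out[:-1]
-- ===== Notes on version B (the rewrite author's own statement) =====
-- stated objective: faster
-- what changed: B sweeps right-to-left maintaining the already-seen suffix as a sorted list and gets each count with a hand-written binary-search upper bound (charge+3), instead of A's per-index suffix slice, shifted copy, and linear 0/1-sum.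
import Mathlib
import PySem

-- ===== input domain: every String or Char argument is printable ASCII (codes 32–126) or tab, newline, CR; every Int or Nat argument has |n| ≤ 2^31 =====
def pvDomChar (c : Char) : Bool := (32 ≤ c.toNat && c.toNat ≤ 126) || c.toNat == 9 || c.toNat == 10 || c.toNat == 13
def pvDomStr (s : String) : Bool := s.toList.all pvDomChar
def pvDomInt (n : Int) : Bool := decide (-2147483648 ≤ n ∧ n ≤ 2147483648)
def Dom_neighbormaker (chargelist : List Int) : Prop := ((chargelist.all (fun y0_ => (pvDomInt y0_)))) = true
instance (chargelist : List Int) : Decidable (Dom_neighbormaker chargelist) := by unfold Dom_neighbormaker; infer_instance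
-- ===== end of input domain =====

-- B replaces A's per-index suffix slice + linear 0/1-sum with a right-to-left sweep that keeps
-- the already-seen suffix in a sorted list and answers each count by binary search (faster).

-- ===== PORT A =====
-- sum(1 if x <= charge else 0 for x in rem_list)
def nmA_sum (charge : Int) (rem : List Int) : Int :=
  (rem.map (fun x => if x ≤ charge then (1 : Int) else 0)).sum

-- the for-loop over enumerate(chargelist) with its break
def nmA_go (xs : List Int) (pairs : List (Int × Int)) (acc : List Int) : List Int :=
  match pairs with
  | [] => acc
  | (index, charge) :: rest =>
    if index = (xs.length : Int) - 1 then acc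
    else
      nmA_go xs rest
        (acc ++ [nmA_sum charge ((PySem.List.slice xs (some (index + 1)) none).map (fun item => item - 3))])

def neighbormaker (chargelist : List Int) : List Int :=
  nmA_go chargelist (PySem.List.enumerate chargelist) []

-- ===== PORT B =====
-- while lo < hi: mid = (lo+hi)//2; if a[mid] <= v: lo = mid+1 else hi = mid  (fuel makes the
-- while-loop total; lo,hi are in [0,len] so '//' is Nat division and a[mid] is in range)
def nmUbGo (a : List Int) (v : Int) (lo hi fuel : Nat) : Nat :=
  match fuel with
  | 0 => lo
  | fuel + 1 =>
    if lo < hi then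
      if a.getD ((lo + hi) / 2) 0 ≤ v then nmUbGo a v ((lo + hi) / 2 + 1) hi fuel
      else nmUbGo a v lo ((lo + hi) / 2) fuel
    else lo

-- def ub(a, v): index of the first element of sorted a that is > v
def nmUb (a : List Int) (v : Int) : Nat := nmUbGo a v 0 a.length a.length

-- loop body: out.append(ub(seen, charge+3)); seen.insert(ub(seen, charge), charge)
def nmB_step (st : List Int × List Int) (charge : Int) : List Int × List Int :=
  (PySem.List.insert st.1 ((nmUb st.1 charge : Nat) : Int) charge,
   st.2 ++ [((nmUb st.1 (charge + 3) : Nat) : Int)])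

-- for charge in reversed(chargelist): …; out.reverse(); return out[:-1]
def neighbormaker_alt (chargelist : List Int) : List Int :=
  PySem.List.slice ((chargelist.reverse.foldl nmB_step ([], [])).2).reverse none (some (-1))

-- ===== PRECONDITION & SPEC =====
def Spec_neighbormaker (chargelist : List Int) (out : List Int) : Prop := out = neighbormaker_alt chargelist
instance (chargelist : List Int) (out : List Int) : Decidable (Spec_neighbormaker chargelist out) := by unfold Spec_neighbormaker; infer_instance

-- ===== CLAIM (what is proved, stated in full; the proofs are below) =====
def Claim_equal_neighbormaker : Prop := ∀ (chargelist : List Int), Dom_neighbormaker chargelist → Spec_neighbormaker chargelist (neighbormaker chargelist)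

-- ===== LEMMAS AND PROOFS =====

-- common closed form: entry i counts the elements after position i that are ≤ xs[i] + 3
def nmSpec (xs : List Int) : List Int :=
  (List.range (xs.length - 1)).map
    (fun i => ((xs.drop (i + 1)).countP (fun x => x ≤ xs.getD i 0 + 3) : Int))

-- same, but including the (always-0) entry for the last index
def nmFSpec (xs : List Int) : List Int :=
  (List.range xs.length).map
    (fun i => ((xs.drop (i + 1)).countP (fun x => x ≤ xs.getD i 0 + 3) : Int))

-- ---- A-side ----
lemma nmA_sum_count (c : Int) (l : List Int) :
    nmA_sum c (l.map (fun item => item - 3)) = ((l.countP (fun x => x ≤ c + 3) : Nat) : Int) := by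
  unfold nmA_sum
  have hf : (fun x : Int => if x ≤ c then (1 : Int) else 0)
      = (fun x : Int => if (fun y : Int => decide (y ≤ c)) x = true then (1 : Int) else 0) := by
    funext x; simp
  rw [hf, PySem.List.sum_map_ite_one_zero (fun y : Int => decide (y ≤ c)) (l.map (fun item => item - 3)),
    List.countP_map]
  congr 1
  apply List.countP_congr
  intro x _
  simp only [Function.comp]
  simp only [decide_eq_true_eq]
  constructor <;> (intro h; omega)

lemma nmA_go_eq (xs : List Int) (m : Nat) :
    ∀ (k : Nat) (acc : List Int), m = xs.length - k → k ≤ xs.length →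
    nmA_go xs (PySem.List.enumerate (xs.drop k) k) acc
      = acc ++ (List.range (xs.length - 1 - k)).map
          (fun t => ((xs.drop (k + t + 1)).countP (fun x => x ≤ xs.getD (k + t) 0 + 3) : Int)) := by
  induction m with
  | zero =>
    intro k acc hm hk
    have hk' : k = xs.length := by omega
    subst hk'
    rw [List.drop_length]
    have h0 : xs.length - 1 - xs.length = 0 := by omega
    rw [h0]
    simp [nmA_go, PySem.List.enumerate]
  | succ m ih =>
    intro k acc hm hk
    have hklt : k < xs.length := by omega
    rw [List.drop_eq_getElem_cons hklt, PySem.List.enumerate_cons]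
    by_cases hlast : k = xs.length - 1
    · have hcast : (k : Int) = (xs.length : Int) - 1 := by omega
      rw [nmA_go, if_pos hcast]
      have h0 : xs.length - 1 - k = 0 := by omega
      rw [h0]
      simp
    · have hcast : ¬((k : Int) = (xs.length : Int) - 1) := by omega
      rw [nmA_go, if_neg hcast]
      have hc1 : (k : Int) + 1 = ((k + 1 : Nat) : Int) := by push_cast; ring
      rw [hc1, PySem.List.slice_from_natCast, ih (k + 1) _ (by omega) (by omega)]
      have hrange : xs.length - 1 - k = (xs.length - 1 - (k + 1)) + 1 := by omega
      rw [hrange, List.range_succ_eq_map, List.map_cons, List.map_map]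
      have hhead : nmA_sum xs[k] ((xs.drop (k + 1)).map (fun item => item - 3))
          = (((xs.drop (k + 0 + 1)).countP (fun x => decide (x ≤ xs.getD (k + 0) 0 + 3)) : Nat) : Int) := by
        have hgd : xs.getD k 0 = xs[k] := List.getD_eq_getElem xs 0 hklt
        simp only [Nat.add_zero, hgd]
        rw [nmA_sum_count]
      have htail : List.map (fun t => (((xs.drop (k + 1 + t + 1)).countP
              (fun x => decide (x ≤ xs.getD (k + 1 + t) 0 + 3)) : Nat) : Int))
            (List.range (xs.length - 1 - (k + 1)))
          = List.map ((fun t => (((xs.drop (k + t + 1)).countP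
              (fun x => decide (x ≤ xs.getD (k + t) 0 + 3)) : Nat) : Int)) ∘ Nat.succ)
            (List.range (xs.length - 1 - (k + 1))) := by
        apply List.map_congr_left
        intro t _
        have hidx : k + 1 + t = k + (t + 1) := by omega
        simp only [Function.comp, Nat.succ_eq_add_one, hidx]
      rw [hhead, htail]
      simp

lemma nmA_eq_spec (xs : List Int) : neighbormaker xs = nmSpec xs := by
  unfold neighbormaker nmSpec
  have h := nmA_go_eq xs (xs.length) 0 [] (by omega) (by omega)
  simp only [Nat.cast_zero, List.drop_zero, List.nil_append, Nat.zero_add, Nat.sub_zero] at h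
  exact h

-- ---- B-side: binary search ----
lemma nm_getD_mono (a : List Int) (ha : a.Pairwise (· ≤ ·)) {i j : Nat}
    (hij : i ≤ j) (hj : j < a.length) : a.getD i 0 ≤ a.getD j 0 := by
  rcases Nat.lt_or_ge i j with h | h
  · have hi : i < a.length := lt_trans h hj
    rw [List.getD_eq_getElem a 0 hi, List.getD_eq_getElem a 0 hj]
    exact List.pairwise_iff_getElem.mp ha i j hi hj h
  · have : i = j := by omega
    subst this; rfl

lemma nmUbGo_part (a : List Int) (v : Int) (ha : a.Pairwise (· ≤ ·)) :
    ∀ (fuel lo hi : Nat), lo ≤ hi → hi ≤ a.length → hi - lo ≤ fuel →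
    (∀ k, k < lo → a.getD k 0 ≤ v) → (∀ k, hi ≤ k → k < a.length → v < a.getD k 0) →
    (∀ k, k < nmUbGo a v lo hi fuel → a.getD k 0 ≤ v) ∧
    (∀ k, nmUbGo a v lo hi fuel ≤ k → k < a.length → v < a.getD k 0) ∧
    nmUbGo a v lo hi fuel ≤ a.length := by
  intro fuel
  induction fuel with
  | zero =>
    intro lo hi h1 h2 h3 hlow hhigh
    have : lo = hi := by omega
    subst this
    exact ⟨hlow, fun k hk => hhigh k hk, h2⟩
  | succ fuel ih =>
    intro lo hi h1 h2 h3 hlow hhigh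
    rw [nmUbGo]
    by_cases hlt : lo < hi
    · rw [if_pos hlt]
      have hmid1 : lo ≤ (lo + hi) / 2 := by omega
      have hmid2 : (lo + hi) / 2 < hi := by omega
      have hmidlen : (lo + hi) / 2 < a.length := by omega
      by_cases hc : a.getD ((lo + hi) / 2) 0 ≤ v
      · rw [if_pos hc]
        refine ih ((lo + hi) / 2 + 1) hi (by omega) h2 (by omega) ?_ hhigh
        intro k hk
        exact le_trans (nm_getD_mono a ha (by omega) hmidlen) hc
      · rw [if_neg hc]
        refine ih lo ((lo + hi) / 2) (by omega) (by omega) (by omega) hlow ?_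
        intro k hk hk2
        exact lt_of_lt_of_le (by omega) (nm_getD_mono a ha hk hk2)
    · rw [if_neg hlt]
      have : lo = hi := by omega
      subst this
      exact ⟨hlow, fun k hk => hhigh k hk, h2⟩

lemma nmUb_part (a : List Int) (v : Int) (ha : a.Pairwise (· ≤ ·)) :
    (∀ k, k < nmUb a v → a.getD k 0 ≤ v) ∧
    (∀ k, nmUb a v ≤ k → k < a.length → v < a.getD k 0) ∧
    nmUb a v ≤ a.length := by
  refine nmUbGo_part a v ha a.length 0 a.length (by omega) (le_refl _) (by omega) ?_ ?_
  · intro k hk; omega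
  · intro k hk1 hk2; omega

lemma nm_mem_take_le (a : List Int) (v : Int) (r : Nat)
    (h1 : ∀ k, k < r → a.getD k 0 ≤ v) : ∀ x ∈ a.take r, x ≤ v := by
  intro x hx
  obtain ⟨i, hi, hgi⟩ := List.mem_iff_getElem.mp hx
  have hil : i < r := by have := hi; rw [List.length_take] at this; omega
  have hia : i < a.length := by have := hi; rw [List.length_take] at this; omega
  have hx' : a[i] = x := by rw [← hgi]; exact (List.getElem_take).symm
  rw [← hx', ← List.getD_eq_getElem a 0 hia]
  exact h1 i hil

lemma nm_mem_drop_gt (a : List Int) (v : Int) (r : Nat)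
    (h2 : ∀ k, r ≤ k → k < a.length → v < a.getD k 0) : ∀ x ∈ a.drop r, v < x := by
  intro x hx
  obtain ⟨i, hi, hgi⟩ := List.mem_iff_getElem.mp hx
  have hia : r + i < a.length := by have := hi; rw [List.length_drop] at this; omega
  have hx' : a[r + i] = x := by rw [← hgi]; exact (List.getElem_drop ..).symm
  rw [← hx', ← List.getD_eq_getElem a 0 hia]
  exact h2 (r + i) (by omega) hia

lemma nm_part_countP (a : List Int) (v : Int) (r : Nat) (hr : r ≤ a.length)
    (h1 : ∀ k, k < r → a.getD k 0 ≤ v) (h2 : ∀ k, r ≤ k → k < a.length → v < a.getD k 0) :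
    a.countP (fun x => decide (x ≤ v)) = r := by
  conv_lhs => rw [← List.take_append_drop r a]
  rw [List.countP_append]
  have htake : (a.take r).countP (fun x => decide (x ≤ v)) = r := by
    rw [List.countP_eq_length.mpr, List.length_take]
    · omega
    · intro x hx
      exact decide_eq_true (nm_mem_take_le a v r h1 x hx)
  have hdrop : (a.drop r).countP (fun x => decide (x ≤ v)) = 0 := by
    rw [List.countP_eq_zero]
    intro x hx
    simpa using not_le.mpr (nm_mem_drop_gt a v r h2 x hx)
  omega

lemma nmUb_eq_countP (a : List Int) (v : Int) (ha : a.Pairwise (· ≤ ·)) :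
    nmUb a v = a.countP (fun x => decide (x ≤ v)) := by
  obtain ⟨h1, h2, h3⟩ := nmUb_part a v ha
  exact (nm_part_countP a v (nmUb a v) h3 h1 h2).symm

-- ---- B-side: sorted insert ----
lemma nm_insert_eq (a : List Int) (v : Int) (ha : a.Pairwise (· ≤ ·)) :
    PySem.List.insert a ((nmUb a v : Nat) : Int) v
      = a.take (nmUb a v) ++ v :: a.drop (nmUb a v) := by
  exact PySem.List.insert_natCast a (nmUb a v) v (nmUb_part a v ha).2.2

lemma nm_insert_perm (a : List Int) (v : Int) (ha : a.Pairwise (· ≤ ·)) :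
    (PySem.List.insert a ((nmUb a v : Nat) : Int) v).Perm (v :: a) := by
  rw [nm_insert_eq a v ha]
  exact (List.perm_middle).trans (by rw [List.take_append_drop])

lemma nm_insert_sorted (a : List Int) (v : Int) (ha : a.Pairwise (· ≤ ·)) :
    (PySem.List.insert a ((nmUb a v : Nat) : Int) v).Pairwise (· ≤ ·) := by
  rw [nm_insert_eq a v ha]
  obtain ⟨h1, h2, h3⟩ := nmUb_part a v ha
  have ha' := ha
  conv at ha' => rw [← List.take_append_drop (nmUb a v) a]
  rw [List.pairwise_append] at ha'
  rw [List.pairwise_append]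
  refine ⟨ha'.1, ?_, ?_⟩
  · rw [List.pairwise_cons]
    exact ⟨fun y hy => le_of_lt (nm_mem_drop_gt a v (nmUb a v) h2 y hy), ha'.2.1⟩
  · intro x hx y hy
    rcases List.mem_cons.mp hy with h | hy'
    · exact le_of_le_of_eq (nm_mem_take_le a v (nmUb a v) h1 x hx) h.symm
    · exact le_of_lt (lt_of_le_of_lt (nm_mem_take_le a v (nmUb a v) h1 x hx)
        (nm_mem_drop_gt a v (nmUb a v) h2 y hy'))

-- ---- B-side: the sweep ----
-- counts produced by the right-to-left sweep on rs, having already seen the multiset s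
def nmGList (rs s : List Int) : List Int :=
  match rs with
  | [] => []
  | c :: t => ((s.countP (fun x => decide (x ≤ c + 3)) : Nat) : Int) :: nmGList t (c :: s)

lemma nmGList_perm : ∀ (rs s s' : List Int), s.Perm s' → nmGList rs s = nmGList rs s' := by
  intro rs
  induction rs with
  | nil => intro s s' _; rfl
  | cons c t ih =>
    intro s s' hp
    unfold nmGList
    rw [hp.countP_eq, ih (c :: s) (c :: s') (hp.cons c)]

lemma nm_fold_spec : ∀ (rs seen out : List Int), seen.Pairwise (· ≤ ·) →
    (rs.foldl nmB_step (seen, out)).2 = out ++ nmGList rs seen := by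
  intro rs
  induction rs with
  | nil => intro seen out _; simp [nmGList]
  | cons c t ih =>
    intro seen out hs
    rw [List.foldl_cons,
      show nmB_step (seen, out) c
          = (PySem.List.insert seen ((nmUb seen c : Nat) : Int) c,
             out ++ [((nmUb seen (c + 3) : Nat) : Int)]) from rfl,
      ih _ _ (nm_insert_sorted seen c hs),
      nmGList_perm t _ (c :: seen) (nm_insert_perm seen c hs)]
    rw [nmUb_eq_countP seen (c + 3) hs,
      show nmGList (c :: t) seen
          = ((seen.countP (fun x => decide (x ≤ c + 3)) : Nat) : Int) :: nmGList t (c :: seen) from rfl]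
    simp

lemma nmFSpec_cons (x : Int) (t : List Int) :
    nmFSpec (x :: t) = ((t.countP (fun y => decide (y ≤ x + 3)) : Nat) : Int) :: nmFSpec t := by
  unfold nmFSpec
  rw [List.length_cons, List.range_succ_eq_map, List.map_cons, List.map_map]
  refine congrArg₂ List.cons ?_ ?_
  · simp
  · apply List.map_congr_left
    intro i _
    simp [Function.comp, List.drop_succ_cons]

lemma nmGList_append (x : Int) : ∀ (l s : List Int),
    nmGList (l ++ [x]) s
      = nmGList l s ++ [(((l.reverse ++ s).countP (fun y => decide (y ≤ x + 3)) : Nat) : Int)] := by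
  intro l
  induction l with
  | nil => intro s; simp [nmGList]
  | cons c t ih =>
    intro s
    rw [List.cons_append,
      show nmGList (c :: (t ++ [x])) s
          = ((s.countP (fun y => decide (y ≤ c + 3)) : Nat) : Int) :: nmGList (t ++ [x]) (c :: s) from rfl,
      ih (c :: s),
      show nmGList (c :: t) s
          = ((s.countP (fun y => decide (y ≤ c + 3)) : Nat) : Int) :: nmGList t (c :: s) from rfl]
    simp

lemma nmGList_rev (xs : List Int) :
    (nmGList xs.reverse []).reverse = nmFSpec xs := by
  induction xs with
  | nil => simp [nmGList, nmFSpec]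
  | cons x t ih =>
    rw [List.reverse_cons, nmGList_append x t.reverse [], List.reverse_append]
    simp only [List.reverse_reverse, List.append_nil, List.reverse_singleton, List.singleton_append]
    rw [ih, nmFSpec_cons]

lemma nmFSpec_dropLast (xs : List Int) : (nmFSpec xs).dropLast = nmSpec xs := by
  unfold nmFSpec nmSpec
  rw [List.dropLast_eq_take, List.length_map, List.length_range, ← List.map_take, List.take_range]
  have hmin : min (xs.length - 1) xs.length = xs.length - 1 := by omega
  rw [hmin]

lemma nmB_eq_spec (xs : List Int) : neighbormaker_alt xs = nmSpec xs := by
  unfold neighbormaker_alt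
  rw [nm_fold_spec xs.reverse [] [] List.Pairwise.nil, List.nil_append,
    PySem.List.slice_to_neg_one, nmGList_rev, nmFSpec_dropLast]

-- ===== VERDICT (by name: the statement is the Claim_ definition above) =====
theorem neighbormaker_spec : Claim_equal_neighbormaker := by
  intro xs _
  unfold Spec_neighbormaker
  rw [nmA_eq_spec, nmB_eq_spec]
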